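-- pv_equiv track=rewrite | github.com/emmanuelmensahx/DIAGNOSIS-MODEL-3---ITERATION-1 | app/services/llm_response_validator.py | _are_diseases_related
-- ===== SOURCE A (Python) =====
-- def _are_diseases_related(disease1: str, disease2: str) -> bool:
--     """Check if two diseases are medically related"""
--
--     # Define disease relationship groups
--     respiratory_diseases = ["pneumonia", "tuberculosis", "lung_cancer", "bronchitis", "asthma"]
--     gi_diseases = ["gastroenteritis", "appendicitis", "cholecystitis", "peptic_ulcer", "hepatitis"]
--     pediatric_diseases = ["measles", "mumps", "chickenpox", "rsv", "rotavirus", "whooping_cough"]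
--
--     disease_groups = [respiratory_diseases, gi_diseases, pediatric_diseases]
--
--     for group in disease_groups:
--         if disease1 in group and disease2 in group:
--             return True
--
--     return False
-- ===== SOURCE B (Python) =====
-- def _are_diseases_related(disease1: str, disease2: str) -> bool:
--     """Check if two diseases are medically related"""
--     respiratory_diseases = ["pneumonia", "tuberculosis", "lung_cancer", "bronchitis", "asthma"]
--     gi_diseases = ["gastroenteritis", "appendicitis", "cholecystitis", "peptic_ulcer", "hepatitis"]
--     pediatric_diseases = ["measles", "mumps", "chickenpox", "rsv", "rotavirus", "whooping_cough"]
--     # Precompute the relation itself: the set of all related ordered pairs.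
--     related_pairs = {(a, b)
--                      for group in (respiratory_diseases, gi_diseases, pediatric_diseases)
--                      for a in group
--                      for b in group}
--     return (disease1, disease2) in related_pairs
-- ===== Notes on version B (the rewrite author's own statement) =====
-- stated objective: alternative
-- what changed: B precomputes the relation extensionally as a set of all related ordered pairs (a cartesian product per group) and answers with a single pair-membership test, instead of A's loop over the three group lists with two membership scans per group.
import Mathlib
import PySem

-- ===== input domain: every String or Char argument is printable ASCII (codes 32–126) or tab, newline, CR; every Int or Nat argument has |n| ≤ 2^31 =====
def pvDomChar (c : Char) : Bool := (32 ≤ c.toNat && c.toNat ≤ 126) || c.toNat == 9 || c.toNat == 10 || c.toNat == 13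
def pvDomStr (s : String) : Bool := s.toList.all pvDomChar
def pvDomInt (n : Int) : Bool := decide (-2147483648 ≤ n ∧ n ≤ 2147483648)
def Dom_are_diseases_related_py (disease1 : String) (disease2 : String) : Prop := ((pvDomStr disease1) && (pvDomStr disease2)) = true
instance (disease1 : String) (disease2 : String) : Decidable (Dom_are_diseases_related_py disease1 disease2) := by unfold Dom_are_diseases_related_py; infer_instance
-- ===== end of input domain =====

-- B materialises the relation extensionally (a set of all related ordered pairs, one cartesian product per group) and answers by a single pair-membership test; A loops over the groups scanning each twice. Same proven return value (alternative).

-- ===== PORT A =====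
-- the for-loop over disease_groups: return True on the first group containing both, else False
def pvLoopA (disease1 : String) (disease2 : String) : List (List String) → Bool
  | [] => false
  | group :: rest =>
      if group.contains disease1 && group.contains disease2 then true
      else pvLoopA disease1 disease2 rest

def are_diseases_related_py (disease1 : String) (disease2 : String) : Bool :=
  let respiratory_diseases := ["pneumonia", "tuberculosis", "lung_cancer", "bronchitis", "asthma"]
  let gi_diseases := ["gastroenteritis", "appendicitis", "cholecystitis", "peptic_ulcer", "hepatitis"]
  let pediatric_diseases := ["measles", "mumps", "chickenpox", "rsv", "rotavirus", "whooping_cough"]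
  let disease_groups := [respiratory_diseases, gi_diseases, pediatric_diseases]
  pvLoopA disease1 disease2 disease_groups

-- ===== PORT B =====
-- the set comprehension {(a,b) for group in groups for a in group for b in group}
def pvRelatedPairs : PySem.Set (String × String) :=
  PySem.Set.ofList
    (([["pneumonia", "tuberculosis", "lung_cancer", "bronchitis", "asthma"],
       ["gastroenteritis", "appendicitis", "cholecystitis", "peptic_ulcer", "hepatitis"],
       ["measles", "mumps", "chickenpox", "rsv", "rotavirus", "whooping_cough"]] :
      List (List String)).flatMap
      (fun group => group.flatMap (fun a => group.map (fun b => (a, b)))))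

def are_diseases_related_py_alt (disease1 : String) (disease2 : String) : Bool :=
  PySem.Set.contains pvRelatedPairs (disease1, disease2)

-- ===== PRECONDITION & SPEC =====
def Spec_are_diseases_related_py (disease1 : String) (disease2 : String) (out : Bool) : Prop := out = are_diseases_related_py_alt disease1 disease2
instance (disease1 : String) (disease2 : String) (out : Bool) : Decidable (Spec_are_diseases_related_py disease1 disease2 out) := by unfold Spec_are_diseases_related_py; infer_instance

-- ===== CLAIM (what is proved, stated in full; the proofs are below) =====
def Claim_equal_are_diseases_related_py : Prop := ∀ (disease1 : String) (disease2 : String), Dom_are_diseases_related_py disease1 disease2 → Spec_are_diseases_related_py disease1 disease2 (are_diseases_related_py disease1 disease2)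

-- ===== LEMMAS AND PROOFS =====

theorem pv_ite3 {c1 c2 c3 : Prop} [Decidable c1] [Decidable c2] [Decidable c3] :
    ((if c1 then true else if c2 then true else if c3 then true else false) = true) ↔ (c1 ∨ c2 ∨ c3) := by
  split_ifs <;> simp_all

-- ===== VERDICT (by name: the statement is the Claim_ definition above) =====
set_option maxHeartbeats 1000000 in
theorem are_diseases_related_py_spec : Claim_equal_are_diseases_related_py := by
  intro d1 d2 _
  unfold Spec_are_diseases_related_py are_diseases_related_py are_diseases_related_py_alt pvRelatedPairs
  dsimp only
  rw [Bool.eq_iff_iff]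
  simp only [pvLoopA, PySem.Set.contains_eq_listContains, List.contains_iff_mem,
    PySem.Set.mem_ofList, List.mem_flatMap, List.mem_map, List.mem_cons, List.not_mem_nil,
    Prod.mk.injEq, Bool.and_eq_true, or_false]
  rw [pv_ite3]
  constructor
  · intro h
    rcases h with h | h | h
    · exact ⟨_, Or.inl rfl, d1, by simp only [List.mem_cons, List.not_mem_nil, or_false]; tauto,
        d2, by simp only [List.mem_cons, List.not_mem_nil, or_false]; tauto, rfl, rfl⟩
    · exact ⟨_, Or.inr (Or.inl rfl), d1, by simp only [List.mem_cons, List.not_mem_nil, or_false]; tauto,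
        d2, by simp only [List.mem_cons, List.not_mem_nil, or_false]; tauto, rfl, rfl⟩
    · exact ⟨_, Or.inr (Or.inr rfl), d1, by simp only [List.mem_cons, List.not_mem_nil, or_false]; tauto,
        d2, by simp only [List.mem_cons, List.not_mem_nil, or_false]; tauto, rfl, rfl⟩
  · rintro ⟨g, hg, a, ha, b, hb, rfl, rfl⟩
    rcases hg with rfl | rfl | rfl <;>
      simp only [List.mem_cons, List.not_mem_nil, or_false] at ha hb
    · exact Or.inl ⟨ha, hb⟩
    · exact Or.inr (Or.inl ⟨ha, hb⟩)
    · exact Or.inr (Or.inr ⟨ha, hb⟩)
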